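-- pv_equiv track=rewrite | github.com/itaigat/pycharner | models/HMM.py | create_obs_list
-- ===== SOURCE A (Python) =====
-- def create_obs_list(
--                     characters,
--                     history_len):
--     """
--     :param characters: list of characters
--     :param history_len: length of history used characters
--     :return: observation list ready for viterbi
--     """
--     observations = []
--     history_obs = '_' * history_len
--     # observations.append(history_obs)
--     for i in range(len(characters)):
--         curr_char = characters[i]
--
--         if curr_char == '\n':
--             # means new document
--             history_obs = '_' * history_len
--             observations.append(history_obs)
--             continue
--
--         curr_obs = history_obs[1:] + curr_char
--         observations.append(curr_obs)
--         history_obs = curr_obs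
--
--     return observations
-- ===== SOURCE B (Python) =====
-- def create_obs_list(characters, history_len):
--     """Split the input into newline-separated documents, emit each document's
--     running-history scan, and join the pieces with the blank observation."""
--     pad = '_' * history_len
--     docs = []
--     cur = []
--     for c in characters:
--         if c == '\n':
--             docs.append(cur)
--             cur = []
--         else:
--             cur.append(c)
--     docs.append(cur)
--     out = _scan_doc(docs[0], pad)
--     for doc in docs[1:]:
--         out.append(pad)
--         out += _scan_doc(doc, pad)
--     return out
--
--
-- def _scan_doc(doc, h):
--     obs = []
--     for c in doc:
--         h = h[1:] + c
--         obs.append(h)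
--     return obs
-- ===== Notes on version B (the rewrite author's own statement) =====
-- stated objective: alternative
-- what changed: Replaces A's single pass with a resettable history accumulator by a split-then-scan decomposition: the input is first split into newline-separated documents, each document is scanned independently from the blank history, and the pieces are joined with the blank observation.
import Mathlib
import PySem

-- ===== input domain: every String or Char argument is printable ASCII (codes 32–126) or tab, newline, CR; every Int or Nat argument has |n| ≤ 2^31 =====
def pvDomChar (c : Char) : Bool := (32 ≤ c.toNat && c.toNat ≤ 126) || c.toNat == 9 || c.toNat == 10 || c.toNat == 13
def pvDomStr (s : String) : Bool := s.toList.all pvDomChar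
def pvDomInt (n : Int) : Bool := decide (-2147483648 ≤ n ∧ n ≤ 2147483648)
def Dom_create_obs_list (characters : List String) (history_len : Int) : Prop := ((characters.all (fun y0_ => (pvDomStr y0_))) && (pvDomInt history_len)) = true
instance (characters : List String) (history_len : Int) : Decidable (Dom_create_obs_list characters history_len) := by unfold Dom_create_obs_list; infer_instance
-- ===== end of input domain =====

-- B splits the input into newline-separated documents, scans each independently, and joins with the blank observation (alternative decomposition; same cost).

-- ===== PORT A =====
def create_obs_list (characters : List String) (history_len : Int) : List String :=
  let pad := String.ofList (List.replicate history_len.toNat '_')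
  (characters.foldl (fun (st : List String × String) curr_char =>
      if curr_char = "\n" then (st.1 ++ [pad], pad)
      else
        let curr_obs := String.ofList (st.2.toList.drop 1) ++ curr_char  -- h[1:] + c; '_' * n below is replicate n.toNat (negative n gives '')
        (st.1 ++ [curr_obs], curr_obs)) ([], pad)).1

-- ===== PORT B =====
-- _scan_doc(doc, h): running-history scan of one document
def scanDocB (doc : List String) (h : String) : List String :=
  (doc.foldl (fun (st : List String × String) c =>
      let o := String.ofList (st.2.toList.drop 1) ++ c  -- h[1:] + c
      (st.1 ++ [o], o)) ([], h)).1

def create_obs_list_alt (characters : List String) (history_len : Int) : List String :=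
  let pad := String.ofList (List.replicate history_len.toNat '_')
  let st := characters.foldl (fun (st : List (List String) × List String) c =>
      if c = "\n" then (st.1 ++ [st.2], []) else (st.1, st.2 ++ [c])) ([], [])
  let docs := st.1 ++ [st.2]
  (docs.tail).foldl (fun out doc => out ++ [pad] ++ scanDocB doc pad)
    (scanDocB (docs.headD []) pad)

-- ===== PRECONDITION & SPEC =====
def Spec_create_obs_list (characters : List String) (history_len : Int) (out : List String) : Prop := out = create_obs_list_alt characters history_len
instance (characters : List String) (history_len : Int) (out : List String) : Decidable (Spec_create_obs_list characters history_len out) := by unfold Spec_create_obs_list; infer_instance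

-- ===== CLAIM (what is proved, stated in full; the proofs are below) =====
def Claim_equal_create_obs_list : Prop := ∀ (characters : List String) (history_len : Int), Dom_create_obs_list characters history_len → Spec_create_obs_list characters history_len (create_obs_list characters history_len)

-- ===== LEMMAS AND PROOFS =====

-- proof-only recursive characterisations
def splitRec : List String → List (List String)
  | [] => [[]]
  | c :: cs =>
    if c = "\n" then [] :: splitRec cs
    else
      match splitRec cs with
      | [] => [[c]]
      | d :: ds => (c :: d) :: ds

def scanRec (h : String) : List String → List String
  | [] => []
  | c :: cs =>
    let o := String.ofList (h.toList.drop 1) ++ c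
    o :: scanRec o cs

lemma splitRec_ne_nil (cs : List String) : splitRec cs ≠ [] := by
  cases cs with
  | nil => simp [splitRec]
  | cons c cs =>
    simp only [splitRec]
    split
    · simp
    · cases splitRec cs <;> simp

-- A's fold equals: scan of the first document from the current history, then, for each later document, pad followed by its scan from pad
lemma A_fold_char (pad : String) : ∀ (cs : List String) (acc : List String) (h : String),
    (cs.foldl (fun (st : List String × String) curr_char =>
      if curr_char = "\n" then (st.1 ++ [pad], pad)
      else
        let curr_obs := String.ofList (st.2.toList.drop 1) ++ curr_char  -- h[1:] + c; '_' * n below is replicate n.toNat (negative n gives '')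
        (st.1 ++ [curr_obs], curr_obs)) (acc, h)).1
    = acc ++ scanRec h ((splitRec cs).headD [])
        ++ ((splitRec cs).tail).flatMap (fun q => pad :: scanRec pad q) := by
  intro cs
  induction cs with
  | nil => intro acc h; simp [splitRec, scanRec]
  | cons c cs ih =>
    intro acc h
    by_cases hc : c = "\n"
    · have hne := splitRec_ne_nil cs
      simp only [List.foldl_cons, hc, ih, splitRec]
      cases hsp : splitRec cs with
      | nil => exact absurd hsp hne
      | cons d ds => simp [scanRec]
    · simp only [List.foldl_cons, ih, splitRec, if_neg hc]
      have hne := splitRec_ne_nil cs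
      cases hsp : splitRec cs with
      | nil => exact absurd hsp hne
      | cons d ds => simp [scanRec]

-- B's split fold equals splitRec (with the accumulated docs and current partial document generalized)
lemma B_split_char : ∀ (cs : List String) (docs : List (List String)) (cur : List String),
    (let st := cs.foldl (fun (st : List (List String) × List String) c =>
        if c = "\n" then (st.1 ++ [st.2], []) else (st.1, st.2 ++ [c])) (docs, cur)
     st.1 ++ [st.2])
    = docs ++ (cur ++ (splitRec cs).headD []) :: (splitRec cs).tail := by
  intro cs
  induction cs with
  | nil => intro docs cur; simp [splitRec]
  | cons c cs ih =>
    intro docs cur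
    have hne := splitRec_ne_nil cs
    by_cases hc : c = "\n"
    · simp only [List.foldl_cons, hc, ih, splitRec]
      cases hsp : splitRec cs with
      | nil => exact absurd hsp hne
      | cons d ds => simp
    · simp only [List.foldl_cons, ih, splitRec, if_neg hc]
      cases hsp : splitRec cs with
      | nil => exact absurd hsp hne
      | cons d ds => simp

-- B's scan fold equals scanRec
lemma B_scan_char : ∀ (doc : List String) (obs : List String) (h : String),
    (doc.foldl (fun (st : List String × String) c =>
      let o := String.ofList (st.2.toList.drop 1) ++ c  -- h[1:] + c
      (st.1 ++ [o], o)) (obs, h)).1 = obs ++ scanRec h doc := by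
  intro doc
  induction doc with
  | nil => intro obs h; simp [scanRec]
  | cons c cs ih =>
    intro obs h
    simp only [List.foldl_cons]
    rw [ih]
    simp [scanRec]

lemma scanDocB_eq (doc : List String) (h : String) : scanDocB doc h = scanRec h doc := by
  simpa [scanDocB] using B_scan_char doc [] h

-- B's join fold flattens to a flatMap
lemma B_join_char (pad : String) : ∀ (ds : List (List String)) (init : List String),
    ds.foldl (fun out doc => out ++ [pad] ++ scanDocB doc pad) init
    = init ++ ds.flatMap (fun q => pad :: scanRec pad q) := by
  intro ds
  induction ds with
  | nil => intro init; simp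
  | cons d ds ih => intro init; rw [List.foldl_cons, ih]; simp [scanDocB_eq, List.flatMap_def]

-- ===== VERDICT (by name: the statement is the Claim_ definition above) =====
theorem create_obs_list_spec : Claim_equal_create_obs_list := by
  intro characters history_len _
  show _ = _
  have hne := splitRec_ne_nil characters
  simp only [create_obs_list, create_obs_list_alt, A_fold_char, B_split_char,
    List.nil_append, B_join_char]
  simp only [scanDocB_eq]
  cases hsp : splitRec characters with
  | nil => exact absurd hsp hne
  | cons d ds => simp [List.flatMap_def]
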